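-- pv_equiv track=rewrite | github.com/tatumdmortimer/core-genome-alignment | compareCoreGenomes.py | get_core_genomes
-- ===== SOURCE A (Python) =====
-- def get_core_genomes(groupsDict, catDict, number, duplicates):
--     """ Gets core genome for each category """
--     coreDict = {}
--     allDict = {} # holds genes present in category, but not shared in all
--     for cat in catDict:
--         coreDict[cat] = set()
--         allDict[cat] = set()
--     for group in groupsDict:
--         genomeList = []
--         proteinList = groupsDict[group]
--         for protein in proteinList:
--             ids = protein.split('|')
--             genomeID = ids[0]
--             genomeList.append(genomeID)
--         genomeSet = set(genomeList)    # create set to check for duplicates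
--         for cat in catDict:
--             if len(catDict[cat] - genomeSet) <= number:
--                 if duplicates:
--                     coreDict[cat].add(group)
--                 elif len(genomeList) == len(genomeSet):
--                     coreDict[cat].add(group)
--             if len(catDict[cat] & genomeSet) > 0:
--                 allDict[cat].add(group)
--     return coreDict, allDict
-- ===== SOURCE B (Python) =====
-- def get_core_genomes(groupsDict, catDict, number, duplicates):
--     rev = {}
--     sizes = {}
--     for cat, members in catDict.items():
--         sizes[cat] = len(members)
--         for g in members:
--             rev.setdefault(g, []).append(cat)
--     extra = {cat: set() for cat in catDict}
--     allDict = {cat: set() for cat in catDict}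
--     okGroups = []
--     for group, proteins in groupsDict.items():
--         genomeSet = set(p.split('|')[0] for p in proteins)
--         ok = duplicates or len(proteins) == len(genomeSet)
--         if ok:
--             okGroups.append(group)
--         counts = {}
--         for g in genomeSet:
--             for cat in rev.get(g, ()):
--                 counts[cat] = counts.get(cat, 0) + 1
--         for cat, c in counts.items():
--             allDict[cat].add(group)
--             if ok and number < sizes[cat] and sizes[cat] - c <= number:
--                 extra[cat].add(group)
--     coreDict = {cat: (set(okGroups) if sizes[cat] <= number else extra[cat])
--                 for cat in catDict}
--     return coreDict, allDict
-- ===== Notes on version B (the rewrite author's own statement) =====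
-- stated objective: alternative
-- what changed: Instead of computing a set difference and a set intersection against every category's member set for every group, B builds a genome-to-categories reverse index once, tallies per-category present counts per group with dictionary lookups, decides core/present membership arithmetically from precomputed category sizes, and fills categories that are core for every duplicate-valid group by bulk-copying the okGroups set.
import Mathlib
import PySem

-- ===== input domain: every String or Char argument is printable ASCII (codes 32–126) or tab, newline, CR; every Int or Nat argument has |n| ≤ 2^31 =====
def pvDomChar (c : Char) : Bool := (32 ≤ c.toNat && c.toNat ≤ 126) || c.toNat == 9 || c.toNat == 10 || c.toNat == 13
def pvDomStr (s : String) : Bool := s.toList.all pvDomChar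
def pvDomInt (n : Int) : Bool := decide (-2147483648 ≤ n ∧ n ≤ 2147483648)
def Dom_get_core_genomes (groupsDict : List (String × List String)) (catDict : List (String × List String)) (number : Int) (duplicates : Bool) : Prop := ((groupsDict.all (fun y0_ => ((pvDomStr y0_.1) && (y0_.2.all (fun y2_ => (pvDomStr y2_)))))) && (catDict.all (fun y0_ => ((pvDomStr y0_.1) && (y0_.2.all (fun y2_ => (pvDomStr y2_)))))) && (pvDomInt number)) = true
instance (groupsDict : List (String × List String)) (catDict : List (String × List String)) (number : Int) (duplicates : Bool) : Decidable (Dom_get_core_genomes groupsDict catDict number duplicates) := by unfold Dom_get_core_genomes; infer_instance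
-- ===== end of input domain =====

-- B replaces A's per-(group,category) set difference/intersection with a genome→categories
-- reverse index, per-category present-counts, and a bulk set(okGroups) copy for the categories
-- that are core for every duplicate-valid group (objective: alternative).

-- shared helpers: iterating a Python dict parameter = its items (unique keys, insertion order)
def pvItems (d : List (String × List String)) : List (String × List String) :=
  (PySem.Dict.ofList d).items

-- ids = protein.split('|'); ids[0]  (separator is non-empty, so split? is `some` and the
-- result is non-empty: index 0 is the head)
def pvGenomeOf (p : String) : String :=
  ((PySem.Str.split? p "|").getD []).headD ""

-- {cat: set() for cat in catDict} (A builds it with two assignments in one loop, B with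
-- comprehensions; the computation is the same)
def pvInitSets (cs : List (String × List String)) : PySem.Dict String (List String) :=
  cs.foldl (fun d c => d.insert c.1 PySem.Set.empty) PySem.Dict.empty

def pvFinish (st : PySem.Dict String (List String) × PySem.Dict String (List String)) :
    (List (String × List String)) × (List (String × List String)) :=
  (st.1.items, st.2.items)

-- ===== PORT A =====
def get_core_genomes (groupsDict : List (String × List String)) (catDict : List (String × List String)) (number : Int) (duplicates : Bool) : (List (String × List String)) × (List (String × List String)) :=
  let cs := pvItems catDict
  let coreDict := pvInitSets cs
  let allDict := pvInitSets cs
  let st := (pvItems groupsDict).foldl (fun st g =>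
      let genomeList := g.2.map pvGenomeOf
      let genomeSet := PySem.Set.ofList genomeList
      cs.foldl (fun st c =>
        let core' :=
          if ((PySem.Set.diff c.2 genomeSet).length : Int) ≤ number then
            (if duplicates then st.1.modify c.1 [] (fun s => PySem.Set.add s g.1)
             else if genomeList.length = genomeSet.length then
               st.1.modify c.1 [] (fun s => PySem.Set.add s g.1)
             else st.1)
          else st.1
        let all' :=
          if 0 < (PySem.Set.inter c.2 genomeSet).length then
            st.2.modify c.1 [] (fun s => PySem.Set.add s g.1)
          else st.2
        (core', all')) st) (coreDict, allDict)
  pvFinish st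

-- ===== PORT B =====
def get_core_genomes_alt (groupsDict : List (String × List String)) (catDict : List (String × List String)) (number : Int) (duplicates : Bool) : (List (String × List String)) × (List (String × List String)) :=
  let cs := pvItems catDict
  -- rev[g] = categories containing genome g (with multiplicity); sizes[cat] = len(members)
  let rev : PySem.Dict String (List String) :=
    cs.foldl (fun d c => c.2.foldl (fun d gn => d.modify gn [] (fun l => l ++ [c.1])) d)
      PySem.Dict.empty
  let sizes : PySem.Dict String Int :=
    cs.foldl (fun d c => d.insert c.1 ((c.2.length : Int))) PySem.Dict.empty
  -- state: (okGroups, extra, allDict)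
  let st := (pvItems groupsDict).foldl
    (fun (st : List String × PySem.Dict String (List String) × PySem.Dict String (List String)) g =>
      let genomeSet := PySem.Set.ofList (g.2.map pvGenomeOf)
      let ok : Bool := duplicates || (g.2.length == genomeSet.length)
      let okGroups' := if ok then st.1 ++ [g.1] else st.1
      let counts : PySem.Dict String Int :=
        genomeSet.foldl
          (fun d gn => (rev.getD gn []).foldl (fun d cat => d.modify cat 0 (fun x => x + 1)) d)
          PySem.Dict.empty
      let st2 := counts.items.foldl
        (fun (st2 : PySem.Dict String (List String) × PySem.Dict String (List String)) p =>
          let extra' :=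
            if ok ∧ number < sizes.getD p.1 0 ∧ sizes.getD p.1 0 - p.2 ≤ number then
              st2.1.modify p.1 [] (fun s => PySem.Set.add s g.1)
            else st2.1
          let all' := st2.2.modify p.1 [] (fun s => PySem.Set.add s g.1)
          (extra', all')) (st.2.1, st.2.2)
      (okGroups', st2.1, st2.2))
    ([], pvInitSets cs, pvInitSets cs)
  -- coreDict = {cat: set(okGroups) if sizes[cat] <= number else extra[cat] for cat in catDict}
  -- (the key is always present in extra, hence getD's default is never used)
  let core := cs.foldl
    (fun d c =>
      d.insert c.1
        (if sizes.getD c.1 0 ≤ number then PySem.Set.ofList st.1 else st.2.1.getD c.1 []))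
    PySem.Dict.empty
  (core.items, st.2.2.items)

-- ===== PRECONDITION & SPEC =====
def Spec_get_core_genomes (groupsDict : List (String × List String)) (catDict : List (String × List String)) (number : Int) (duplicates : Bool) (out : (List (String × List String)) × (List (String × List String))) : Prop := out = get_core_genomes_alt groupsDict catDict number duplicates
instance (groupsDict : List (String × List String)) (catDict : List (String × List String)) (number : Int) (duplicates : Bool) (out : (List (String × List String)) × (List (String × List String))) : Decidable (Spec_get_core_genomes groupsDict catDict number duplicates out) := by unfold Spec_get_core_genomes; infer_instance

-- ===== CLAIM (what is proved, stated in full; the proofs are below) =====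
def Claim_equal_get_core_genomes : Prop := ∀ (groupsDict : List (String × List String)) (catDict : List (String × List String)) (number : Int) (duplicates : Bool), Dom_get_core_genomes groupsDict catDict number duplicates → Spec_get_core_genomes groupsDict catDict number duplicates (get_core_genomes groupsDict catDict number duplicates)

-- ===== LEMMAS AND PROOFS =====

-- ---- canonical Bool conditions used by the proof ----

def pvGset (g : String × List String) : List String :=
  PySem.Set.ofList (g.2.map pvGenomeOf)

def pvOkB (duplicates : Bool) (g : String × List String) : Bool :=
  duplicates || (g.2.length == (pvGset g).length)

def pvTCoreB (number : Int) (duplicates : Bool) (c g : String × List String) : Bool :=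
  pvOkB duplicates g && decide (((PySem.Set.diff c.2 (pvGset g)).length : Int) ≤ number)

def pvTAllB (c g : String × List String) : Bool :=
  decide (0 < (PySem.Set.inter c.2 (pvGset g)).length)

def pvTExtB (number : Int) (duplicates : Bool) (c g : String × List String) : Bool :=
  pvOkB duplicates g &&
    decide (number < (c.2.length : Int) ∧
      (c.2.length : Int) - ((PySem.Set.inter c.2 (pvGset g)).length : Int) ≤ number)

-- ---- proof-side names for B's auxiliary dicts (definitionally the port's subterms) ----

def pvRevD (catDict : List (String × List String)) : PySem.Dict String (List String) :=
  (pvItems catDict).foldl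
    (fun d c => c.2.foldl (fun d gn => d.modify gn [] (fun l => l ++ [c.1])) d)
    PySem.Dict.empty

def pvSizesD (catDict : List (String × List String)) : PySem.Dict String Int :=
  (pvItems catDict).foldl (fun d c => d.insert c.1 ((c.2.length : Int))) PySem.Dict.empty

def pvCountsD (catDict : List (String × List String)) (g : String × List String) :
    PySem.Dict String Int :=
  (pvGset g).foldl
    (fun d gn => ((pvRevD catDict).getD gn []).foldl
      (fun d cat => d.modify cat 0 (fun x => x + 1)) d)
    PySem.Dict.empty

def pvExtItemB (number : Int) (duplicates : Bool) (catDict : List (String × List String))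
    (g : String × List String) (p : String × Int) : Bool :=
  pvOkB duplicates g &&
    decide (number < (pvSizesD catDict).getD p.1 0 ∧
      (pvSizesD catDict).getD p.1 0 - p.2 ≤ number)

-- ---- canonical per-group steps ----

def pvStepCore (number : Int) (duplicates : Bool) (cs : List (String × List String))
    (g : String × List String) (d : PySem.Dict String (List String)) :
    PySem.Dict String (List String) :=
  cs.foldl
    (fun d c => if pvTCoreB number duplicates c g then
      d.modify c.1 [] (fun s => PySem.Set.add s g.1) else d) d

def pvStepAll (cs : List (String × List String)) (g : String × List String)
    (d : PySem.Dict String (List String)) : PySem.Dict String (List String) :=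
  cs.foldl
    (fun d c => if pvTAllB c g then d.modify c.1 [] (fun s => PySem.Set.add s g.1) else d) d

def pvStepExtB (number : Int) (duplicates : Bool) (catDict : List (String × List String))
    (g : String × List String) (d : PySem.Dict String (List String)) :
    PySem.Dict String (List String) :=
  (pvCountsD catDict g).items.foldl
    (fun d p => if pvExtItemB number duplicates catDict g p then
      d.modify p.1 [] (fun s => PySem.Set.add s g.1) else d) d

def pvStepAllB (catDict : List (String × List String)) (g : String × List String)
    (d : PySem.Dict String (List String)) : PySem.Dict String (List String) :=
  (pvCountsD catDict g).items.foldl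
    (fun d p => d.modify p.1 [] (fun s => PySem.Set.add s g.1)) d

def pvFoldD (step : (String × List String) → PySem.Dict String (List String) →
    PySem.Dict String (List String)) (gs : List (String × List String))
    (d0 : PySem.Dict String (List String)) : PySem.Dict String (List String) :=
  gs.foldl (fun d g => step g d) d0

-- ---- basic facts ----

lemma pvItems_keys_nodup (d : List (String × List String)) :
    ((pvItems d).map Prod.fst).Nodup := by
  have h := PySem.Dict.nodup_keys_ofList (κ := String) (ν := List String) d
  simpa [pvItems, PySem.Dict.keys] using h

lemma pvKeyInj {α : Type} (cs : List (String × α)) (hnd : (cs.map Prod.fst).Nodup)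
    {c c' : String × α} (hc : c ∈ cs) (hc' : c' ∈ cs) (h : c.1 = c'.1) : c = c' := by
  induction cs with
  | nil => cases hc
  | cons x t ih =>
    simp only [List.map_cons, List.nodup_cons] at hnd
    rcases List.mem_cons.mp hc with h1 | h1 <;> rcases List.mem_cons.mp hc' with h2 | h2
    · rw [h1, h2]
    · exfalso
      apply hnd.1
      rw [← h1, h]
      exact List.mem_map_of_mem h2
    · exfalso
      apply hnd.1
      rw [← h2, ← h]
      exact List.mem_map_of_mem h1
    · exact ih hnd.2 h1 h2

lemma pvMapFilter (l : List String) (k gn : String) :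
    ((l.map (fun g => (g, k))).filter (fun p => p.1 == gn)).map (fun p => p.2)
      = List.replicate (l.count gn) k := by
  induction l with
  | nil => simp
  | cons x t ih =>
    by_cases h : x = gn <;> simp [h, ih, List.replicate_succ]

-- characterisation of the reverse-index dict
lemma pvRev_getD (cs : List (String × List String)) (d : PySem.Dict String (List String))
    (gn : String) :
    (cs.foldl (fun d c => c.2.foldl (fun d g => d.modify g [] (fun l => l ++ [c.1])) d) d).getD gn []
      = d.getD gn [] ++ cs.flatMap (fun c => List.replicate (c.2.count gn) c.1) := by
  induction cs generalizing d with
  | nil => simp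
  | cons c t ih =>
    rw [List.foldl_cons, ih]
    have h1 : (c.2.foldl (fun d g => d.modify g [] (fun l => l ++ [c.1])) d)
        = ((c.2.map (fun g => (g, c.1))).foldl (fun d p => d.modify p.1 [] (fun l => l ++ [p.2])) d) := by
      rw [List.foldl_map]
    rw [h1, PySem.Dict.getD_foldl_modify_append, pvMapFilter]
    simp [List.append_assoc]

lemma pvFlatCount_notmem (cs : List (String × List String)) (a gn : String)
    (h : a ∉ cs.map Prod.fst) :
    (cs.flatMap (fun c => List.replicate (c.2.count gn) c.1)).count a = 0 := by
  induction cs with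
  | nil => simp
  | cons c t ih =>
    simp only [List.map_cons, List.mem_cons, not_or] at h
    simp [List.count_append, List.count_replicate, ih h.2, Ne.symm h.1]

lemma pvFlatCount (cs : List (String × List String)) (hnd : (cs.map Prod.fst).Nodup)
    (c : String × List String) (hc : c ∈ cs) (gn : String) :
    (cs.flatMap (fun c' => List.replicate (c'.2.count gn) c'.1)).count c.1 = c.2.count gn := by
  induction cs with
  | nil => cases hc
  | cons c' t ih =>
    simp only [List.map_cons, List.nodup_cons] at hnd
    rcases List.mem_cons.mp hc with h | h
    · subst h
      rw [List.flatMap_cons, List.count_append, List.count_replicate,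
        pvFlatCount_notmem t c.1 gn hnd.1]
      simp
    · have hne : c'.1 ≠ c.1 := by
        intro he; exact hnd.1 (he ▸ List.mem_map_of_mem h)
      rw [List.flatMap_cons, List.count_append, List.count_replicate, ih hnd.2 h]
      simp [hne]

lemma pvCounts_getD (rev : PySem.Dict String (List String)) (s : List String)
    (d : PySem.Dict String Int) (k : String) :
    (s.foldl (fun d gn => (rev.getD gn []).foldl (fun d cat => d.modify cat 0 (fun x => x + 1)) d) d).getD k 0
      = d.getD k 0 + ((s.map (fun gn => ((rev.getD gn []).count k : Int))).sum) := by
  induction s generalizing d with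
  | nil => simp
  | cons gn t ih =>
    rw [List.foldl_cons, ih, PySem.Dict.getD_foldl_modify_add_one]
    simp [add_assoc]

lemma pvFilterMem (c2 : List String) (g : String) (t : List String) (hg : g ∉ t) :
    (c2.filter (fun x => decide (x = g) || decide (x ∈ t))).length
      = c2.count g + (c2.filter (fun x => decide (x ∈ t))).length := by
  induction c2 with
  | nil => simp
  | cons x c ih =>
    by_cases h : x = g
    · subst h
      simp [hg, ih]
      omega
    · by_cases h2 : x ∈ t
      · simp [h, h2, ih]
        omega
      · simp [h, h2, ih]

lemma pvSumCountNat (c2 s : List String) (hs : s.Nodup) :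
    (s.map (fun gn => c2.count gn)).sum = (c2.filter (fun x => decide (x ∈ s))).length := by
  induction s with
  | nil => simp
  | cons g t ih =>
    rw [List.nodup_cons] at hs
    have hfc : c2.filter (fun x => decide (x ∈ (g :: t)))
        = c2.filter (fun x => decide (x = g) || decide (x ∈ t)) := by
      apply List.filter_congr
      intro x _
      simp [List.mem_cons]
    rw [List.map_cons, List.sum_cons, ih hs.2, hfc, pvFilterMem c2 g t hs.1]

lemma pvSumCount (c2 s : List String) (hs : s.Nodup) :
    ((s.map (fun gn => ((c2.count gn : Nat) : Int))).sum)
      = ((PySem.Set.inter c2 s).length : Int) := by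
  have h := pvSumCountNat c2 s hs
  have hi : PySem.Set.inter c2 s = c2.filter (fun x => decide (x ∈ s)) := by
    rw [PySem.Set.inter]
    apply List.filter_congr
    intro x _
    simp
  have hcast : ((s.map (fun gn => c2.count gn)).sum : Int)
      = ((c2.filter (fun x => decide (x ∈ s))).length : Int) := by exact_mod_cast h
  rw [hi, ← hcast, Nat.cast_list_sum, List.map_map]
  rfl

lemma pvDiffInter (c2 s : List String) :
    (PySem.Set.diff c2 s).length + (PySem.Set.inter c2 s).length = c2.length := by
  have hd : PySem.Set.diff c2 s = c2.filter (fun x => !decide (x ∈ s)) := by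
    rw [PySem.Set.diff]
    apply List.filter_congr
    intro x _
    simp
  have hi : PySem.Set.inter c2 s = c2.filter (fun x => decide (x ∈ s)) := by
    rw [PySem.Set.inter]
    apply List.filter_congr
    intro x _
    simp
  rw [hd, hi]
  clear hd hi
  induction c2 with
  | nil => simp
  | cons x c ih =>
    by_cases h : x ∈ s <;> simp [h] <;> omega

-- ---- generic insert-loop facts (sizes, the initial set dicts, B's final core dict) ----

lemma pvIL_items {ν : Type} (cs : List (String × List String))
    (hnd : (cs.map Prod.fst).Nodup) (v : (String × List String) → ν) :
    (cs.foldl (fun d c => d.insert c.1 (v c)) PySem.Dict.empty).items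
      = cs.map (fun c => (c.1, v c)) := by
  have h := PySem.Dict.items_foldl_insert_fresh cs Prod.fst v PySem.Dict.empty
    (by intro a _; simp [PySem.Dict.contains_empty]) hnd
  simpa using h

lemma pvIL_getD {ν : Type} (cs : List (String × List String))
    (hnd : (cs.map Prod.fst).Nodup) (v : (String × List String) → ν)
    (c : String × List String) (hc : c ∈ cs) (d0 : ν) :
    (cs.foldl (fun d c' => d.insert c'.1 (v c')) PySem.Dict.empty).getD c.1 d0 = v c := by
  have hkeys : ((cs.foldl (fun d c' => d.insert c'.1 (v c')) PySem.Dict.empty)).keys.Nodup :=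
    PySem.Dict.nodup_keys_foldl_insert_key cs Prod.fst (fun _ c' => v c') PySem.Dict.empty
      PySem.Dict.nodup_keys_empty
  refine PySem.Dict.getD_of_mem_items _ ?_ hkeys d0
  rw [pvIL_items cs hnd v]
  exact List.mem_map_of_mem hc

lemma pvIL_keys {ν : Type} (cs : List (String × List String))
    (hnd : (cs.map Prod.fst).Nodup) (v : (String × List String) → ν) :
    (cs.foldl (fun d c => d.insert c.1 (v c)) PySem.Dict.empty).keys = cs.map Prod.fst := by
  have h := PySem.Dict.keys_foldl_insert_key cs Prod.fst (fun _ c => v c) PySem.Dict.empty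
  rw [h, PySem.Dict.keys_empty, PySem.Set.update_nil_left,
    PySem.Set.ofList_eq_self_of_nodup _ hnd]

-- ---- generic conditional-modify loop facts ----

lemma pvCM_getD_ne {α : Type} (l : List α) (key : α → String) (P : α → Bool)
    (gname : String) (d : PySem.Dict String (List String)) (k : String)
    (hk : ∀ x ∈ l, key x ≠ k) :
    (l.foldl (fun d x => if P x then d.modify (key x) [] (fun s => PySem.Set.add s gname) else d) d).getD k []
      = d.getD k [] := by
  induction l generalizing d with
  | nil => rfl
  | cons x t ih =>
    rw [List.foldl_cons, ih _ (fun y hy => hk y (List.mem_cons_of_mem _ hy))]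
    by_cases h : P x = true
    · rw [if_pos h, PySem.Dict.getD_modify, if_neg (fun he => hk x List.mem_cons_self he.symm)]
    · rw [if_neg h]

lemma pvCM_getD_self {α : Type} (l : List α) (key : α → String) (P : α → Bool)
    (gname : String) (d : PySem.Dict String (List String)) (x : α) (hx : x ∈ l)
    (hnd : (l.map key).Nodup) :
    (l.foldl (fun d x => if P x then d.modify (key x) [] (fun s => PySem.Set.add s gname) else d) d).getD (key x) []
      = if P x then PySem.Set.add (d.getD (key x) []) gname else d.getD (key x) [] := by
  induction l generalizing d with
  | nil => cases hx
  | cons y t ih =>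
    simp only [List.map_cons, List.nodup_cons] at hnd
    rcases List.mem_cons.mp hx with h1 | h1
    · subst h1
      rw [List.foldl_cons,
        pvCM_getD_ne t key P gname _ (key x)
          (fun z hz he => hnd.1 (he ▸ List.mem_map_of_mem hz))]
      by_cases h : P x = true
      · rw [if_pos h, if_pos h, PySem.Dict.getD_modify, if_pos rfl]
      · rw [if_neg h, if_neg h]
    · have hne : key y ≠ key x := fun he => hnd.1 (he ▸ List.mem_map_of_mem h1)
      rw [List.foldl_cons]
      have hbase : (if P y then d.modify (key y) [] (fun s => PySem.Set.add s gname) else d).getD (key x) []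
          = d.getD (key x) [] := by
        by_cases h : P y = true
        · rw [if_pos h, PySem.Dict.getD_modify, if_neg (fun he => hne he.symm)]
        · rw [if_neg h]
      rw [ih _ h1 hnd.2, hbase]

lemma pvCM_keys {α : Type} (l : List α) (key : α → String) (P : α → Bool)
    (gname : String) (d : PySem.Dict String (List String))
    (h : ∀ x ∈ l, d.contains (key x) = true) :
    (l.foldl (fun d x => if P x then d.modify (key x) [] (fun s => PySem.Set.add s gname) else d) d).keys
      = d.keys := by
  induction l generalizing d with
  | nil => rfl
  | cons y t ih =>
    rw [List.foldl_cons]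
    have hy := h y List.mem_cons_self
    have hstep : (if P y then d.modify (key y) [] (fun s => PySem.Set.add s gname) else d).keys = d.keys := by
      by_cases hp : P y = true
      · rw [if_pos hp, PySem.Dict.keys_modify, PySem.Dict.keys_insert_of_contains _ _ hy]
      · rw [if_neg hp]
    rw [ih _ ?_, hstep]
    intro z hz
    by_cases hp : P y = true
    · rw [if_pos hp, PySem.Dict.contains_modify]
      simp [h z (List.mem_cons_of_mem _ hz)]
    · rw [if_neg hp]
      exact h z (List.mem_cons_of_mem _ hz)

-- ---- the group-level fold: conditional adds of distinct group names ----

lemma pvGF_getD (c1 : String)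
    (S : (String × List String) → PySem.Dict String (List String) → PySem.Dict String (List String))
    (T : (String × List String) → Bool)
    (hget : ∀ g d, (S g d).getD c1 [] =
      if T g then PySem.Set.add (d.getD c1 []) g.1 else d.getD c1 [])
    (gs : List (String × List String)) (hnd : (gs.map Prod.fst).Nodup)
    (d : PySem.Dict String (List String)) (hfresh : ∀ g ∈ gs, g.1 ∉ d.getD c1 []) :
    (pvFoldD S gs d).getD c1 []
      = d.getD c1 [] ++ (gs.filter T).map Prod.fst := by
  induction gs generalizing d with
  | nil => simp [pvFoldD]
  | cons g t ih =>
    simp only [List.map_cons, List.nodup_cons] at hnd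
    have hstep := hget g d
    by_cases h : T g = true
    · have hv : (S g d).getD c1 [] = d.getD c1 [] ++ [g.1] := by
        rw [hstep, if_pos h, PySem.Set.add_of_not_mem (hfresh g (List.mem_cons_self))]
      have hfresh' : ∀ g' ∈ t, g'.1 ∉ (S g d).getD c1 [] := by
        intro g' hg'
        rw [hv]
        simp only [List.mem_append, List.mem_singleton, not_or]
        exact ⟨hfresh g' (List.mem_cons_of_mem _ hg'),
          fun he => hnd.1 (he ▸ List.mem_map_of_mem hg')⟩
      have := ih hnd.2 (S g d) hfresh'
      rw [pvFoldD, List.foldl_cons] at *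
      rw [this, hv, List.filter_cons_of_pos h]
      simp [List.append_assoc]
    · have hv : (S g d).getD c1 [] = d.getD c1 [] := by rw [hstep, if_neg h]
      have hfresh' : ∀ g' ∈ t, g'.1 ∉ (S g d).getD c1 [] := by
        intro g' hg'
        rw [hv]
        exact hfresh g' (List.mem_cons_of_mem _ hg')
      have := ih hnd.2 (S g d) hfresh'
      rw [pvFoldD, List.foldl_cons] at *
      rw [this, hv, List.filter_cons_of_neg (by simpa using h)]

lemma pvGF_keys (K : List String)
    (S : (String × List String) → PySem.Dict String (List String) → PySem.Dict String (List String))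
    (hkeys : ∀ g d, d.keys = K → (S g d).keys = K)
    (gs : List (String × List String)) (d : PySem.Dict String (List String))
    (hd : d.keys = K) : (pvFoldD S gs d).keys = K := by
  induction gs generalizing d with
  | nil => exact hd
  | cons g t ih =>
    rw [pvFoldD, List.foldl_cons]
    exact ih _ (hkeys g d hd)

-- ---- facts about B's dicts ----

lemma pvSizes_getD (catDict : List (String × List String))
    (c : String × List String) (hc : c ∈ pvItems catDict) :
    (pvSizesD catDict).getD c.1 0 = (c.2.length : Int) :=
  pvIL_getD (pvItems catDict) (pvItems_keys_nodup catDict) _ c hc 0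

lemma pvCnt_getD (catDict : List (String × List String))
    (c : String × List String) (hc : c ∈ pvItems catDict) (g : String × List String) :
    (pvCountsD catDict g).getD c.1 0
      = ((PySem.Set.inter c.2 (pvGset g)).length : Int) := by
  have hnd := pvItems_keys_nodup catDict
  rw [pvCountsD, pvCounts_getD]
  have hmap : ((pvGset g).map (fun gn => (((pvRevD catDict).getD gn []).count c.1 : Int)))
      = (pvGset g).map (fun gn => ((c.2.count gn : Nat) : Int)) := by
    refine List.map_congr_left ?_
    intro gn _
    rw [pvRevD, pvRev_getD]
    simp only [PySem.Dict.getD_empty, List.nil_append]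
    rw [pvFlatCount (pvItems catDict) hnd c hc gn]
  rw [hmap, pvSumCount c.2 (pvGset g) (PySem.Set.nodup_ofList _)]
  simp

lemma pvCountsAux_keys_sub (rev : PySem.Dict String (List String)) (s : List String)
    (d : PySem.Dict String Int) (k : String)
    (hk : k ∈ (s.foldl (fun d gn => (rev.getD gn []).foldl
      (fun d cat => d.modify cat 0 (fun x => x + 1)) d) d).keys) :
    k ∈ d.keys ∨ ∃ gn ∈ s, k ∈ rev.getD gn [] := by
  induction s generalizing d with
  | nil => exact Or.inl hk
  | cons gn t ih =>
    rw [List.foldl_cons] at hk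
    rcases ih _ hk with h | ⟨gn', hgn', hmem⟩
    · rw [PySem.Dict.keys_foldl_modify] at h
      rcases (PySem.Set.mem_update _ _ _).mp h with h | h
      · exact Or.inl h
      · exact Or.inr ⟨gn, List.mem_cons_self, h⟩
    · exact Or.inr ⟨gn', List.mem_cons_of_mem _ hgn', hmem⟩

lemma pvCnt_keys_sub (catDict : List (String × List String)) (g : String × List String)
    (k : String) (hk : k ∈ (pvCountsD catDict g).keys) :
    k ∈ (pvItems catDict).map Prod.fst := by
  rcases pvCountsAux_keys_sub (pvRevD catDict) (pvGset g) PySem.Dict.empty k hk with h | ⟨gn, _, hmem⟩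
  · simp [PySem.Dict.keys_empty] at h
  · rw [pvRevD, pvRev_getD] at hmem
    simp only [PySem.Dict.getD_empty, List.nil_append] at hmem
    rcases List.mem_flatMap.mp hmem with ⟨c', hc', hrep⟩
    rw [List.eq_of_mem_replicate hrep]
    exact List.mem_map_of_mem hc'

lemma pvCnt_keys_nodup (catDict : List (String × List String)) (g : String × List String) :
    (pvCountsD catDict g).keys.Nodup := by
  rw [pvCountsD]
  have h : ∀ (s : List String) (d : PySem.Dict String Int), d.keys.Nodup →
      (s.foldl (fun d gn => ((pvRevD catDict).getD gn []).foldl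
        (fun d cat => d.modify cat 0 (fun x => x + 1)) d) d).keys.Nodup := by
    intro s
    induction s with
    | nil => exact fun d hd => hd
    | cons gn t ih =>
      intro d hd
      rw [List.foldl_cons]
      refine ih _ ?_
      rw [PySem.Dict.keys_foldl_modify]
      exact PySem.Set.nodup_update _ _ hd
  exact h _ _ (by simp [PySem.Dict.keys_empty])

lemma pvCnt_contains (catDict : List (String × List String))
    (c : String × List String) (hc : c ∈ pvItems catDict) (g : String × List String) :
    (pvCountsD catDict g).contains c.1 = true
      ↔ 0 < (PySem.Set.inter c.2 (pvGset g)).length := by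
  have hnd := pvItems_keys_nodup catDict
  constructor
  · intro hcont
    have hk := (PySem.Dict.contains_iff_mem_keys _ _).mp hcont
    rw [pvCountsD] at hk
    rcases pvCountsAux_keys_sub (pvRevD catDict) (pvGset g) PySem.Dict.empty c.1 hk with h | ⟨gn, hgn, hmem⟩
    · simp [PySem.Dict.keys_empty] at h
    · rw [pvRevD, pvRev_getD] at hmem
      simp only [PySem.Dict.getD_empty, List.nil_append] at hmem
      rcases List.mem_flatMap.mp hmem with ⟨c', hc', hrep⟩
      have hkey : c.1 = c'.1 := List.eq_of_mem_replicate hrep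
      have hcc : c' = c := pvKeyInj (pvItems catDict) hnd hc' hc hkey.symm
      have hcnt : 0 < c'.2.count gn := by
        rcases (List.mem_replicate.mp hrep) with ⟨hne, _⟩
        omega
      have hgmem : gn ∈ c.2 := by
        rw [← hcc]
        exact List.count_pos_iff.mp hcnt
      have : gn ∈ PySem.Set.inter c.2 (pvGset g) :=
        (PySem.Set.mem_inter _ _ _).mpr ⟨hgmem, hgn⟩
      exact List.length_pos_of_mem this
  · intro hpos
    by_contra hcont
    have hfalse : (pvCountsD catDict g).contains c.1 = false :=
      Bool.not_eq_true _ ▸ (Bool.eq_false_iff.mpr hcont)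
    have h0 := PySem.Dict.getD_of_not_contains (pvCountsD catDict g) (0 : Int) hfalse
    rw [pvCnt_getD catDict c hc g] at h0
    omega

-- ---- per-group step characterisations ----

-- unconditional modify loop (B's allDict updates)
lemma pvM_getD_ne (l : List (String × Int)) (gname : String)
    (d : PySem.Dict String (List String)) (k : String)
    (hk : ∀ p ∈ l, p.1 ≠ k) :
    (l.foldl (fun d p => d.modify p.1 [] (fun s => PySem.Set.add s gname)) d).getD k []
      = d.getD k [] := by
  induction l generalizing d with
  | nil => rfl
  | cons x t ih =>
    rw [List.foldl_cons, ih _ (fun y hy => hk y (List.mem_cons_of_mem _ hy)),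
      PySem.Dict.getD_modify, if_neg (fun he => hk x List.mem_cons_self he.symm)]

lemma pvM_getD_self (l : List (String × Int)) (gname : String)
    (d : PySem.Dict String (List String)) (x : String × Int) (hx : x ∈ l)
    (hnd : (l.map Prod.fst).Nodup) :
    (l.foldl (fun d p => d.modify p.1 [] (fun s => PySem.Set.add s gname)) d).getD x.1 []
      = PySem.Set.add (d.getD x.1 []) gname := by
  induction l generalizing d with
  | nil => cases hx
  | cons y t ih =>
    simp only [List.map_cons, List.nodup_cons] at hnd
    rcases List.mem_cons.mp hx with h1 | h1
    · subst h1
      rw [List.foldl_cons,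
        pvM_getD_ne t gname _ x.1 (fun z hz he => hnd.1 (he ▸ List.mem_map_of_mem hz)),
        PySem.Dict.getD_modify, if_pos rfl]
    · have hne : y.1 ≠ x.1 := fun he => hnd.1 (he ▸ List.mem_map_of_mem h1)
      rw [List.foldl_cons, ih _ h1 hnd.2, PySem.Dict.getD_modify,
        if_neg (fun he => hne he.symm)]

lemma pvM_keys (l : List (String × Int)) (gname : String)
    (d : PySem.Dict String (List String))
    (h : ∀ p ∈ l, d.contains p.1 = true) :
    (l.foldl (fun d p => d.modify p.1 [] (fun s => PySem.Set.add s gname)) d).keys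
      = d.keys := by
  induction l generalizing d with
  | nil => rfl
  | cons y t ih =>
    rw [List.foldl_cons]
    have hy := h y List.mem_cons_self
    have hstep : (d.modify y.1 [] (fun s => PySem.Set.add s gname)).keys = d.keys := by
      rw [PySem.Dict.keys_modify, PySem.Dict.keys_insert_of_contains _ _ hy]
    rw [ih _ ?_, hstep]
    intro z hz
    rw [PySem.Dict.contains_modify]
    simp [h z (List.mem_cons_of_mem _ hz)]

lemma pvStepCore_getD (number : Int) (duplicates : Bool)
    (cs : List (String × List String)) (hnd : (cs.map Prod.fst).Nodup)
    (c : String × List String) (hc : c ∈ cs) (g : String × List String)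
    (d : PySem.Dict String (List String)) :
    (pvStepCore number duplicates cs g d).getD c.1 []
      = if pvTCoreB number duplicates c g then PySem.Set.add (d.getD c.1 []) g.1
        else d.getD c.1 [] :=
  pvCM_getD_self cs Prod.fst (fun c' => pvTCoreB number duplicates c' g) g.1 d c hc hnd

lemma pvStepAll_getD (cs : List (String × List String)) (hnd : (cs.map Prod.fst).Nodup)
    (c : String × List String) (hc : c ∈ cs) (g : String × List String)
    (d : PySem.Dict String (List String)) :
    (pvStepAll cs g d).getD c.1 []
      = if pvTAllB c g then PySem.Set.add (d.getD c.1 []) g.1 else d.getD c.1 [] :=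
  pvCM_getD_self cs Prod.fst (fun c' => pvTAllB c' g) g.1 d c hc hnd

lemma pvCnt_items_nodup (catDict : List (String × List String)) (g : String × List String) :
    ((pvCountsD catDict g).items.map Prod.fst).Nodup := by
  have h := pvCnt_keys_nodup catDict g
  simpa [PySem.Dict.keys] using h

lemma pvCnt_not_mem_items (catDict : List (String × List String))
    (g : String × List String) (k : String)
    (hcont : ¬ (pvCountsD catDict g).contains k = true) :
    ∀ p ∈ (pvCountsD catDict g).items, p.1 ≠ k := by
  intro p hp he
  apply hcont
  refine (PySem.Dict.contains_iff_mem_keys _ _).mpr ?_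
  rw [← he]
  exact PySem.Dict.mem_keys_of_mem_items _ hp

lemma pvCnt_mem_items (catDict : List (String × List String))
    (c : String × List String) (hc : c ∈ pvItems catDict) (g : String × List String)
    (hcont : (pvCountsD catDict g).contains c.1 = true) :
    (c.1, ((PySem.Set.inter c.2 (pvGset g)).length : Int)) ∈ (pvCountsD catDict g).items := by
  have hsome : ((pvCountsD catDict g).get? c.1).isSome := by
    rw [← PySem.Dict.contains_eq_isSome_get?]
    exact hcont
  rcases Option.isSome_iff_exists.mp hsome with ⟨v, hv⟩
  have hval : v = ((PySem.Set.inter c.2 (pvGset g)).length : Int) := by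
    have := pvCnt_getD catDict c hc g
    rw [PySem.Dict.getD_eq_get?_getD, hv] at this
    simpa using this
  rw [← hval]
  exact PySem.Dict.mem_items_of_get?_eq_some _ hv

lemma pvStepExtB_getD (number : Int) (duplicates : Bool)
    (catDict : List (String × List String))
    (c : String × List String) (hc : c ∈ pvItems catDict) (g : String × List String)
    (d : PySem.Dict String (List String)) :
    (pvStepExtB number duplicates catDict g d).getD c.1 []
      = if pvTExtB number duplicates c g then PySem.Set.add (d.getD c.1 []) g.1
        else d.getD c.1 [] := by
  by_cases hcont : (pvCountsD catDict g).contains c.1 = true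
  · have hmem := pvCnt_mem_items catDict c hc g hcont
    have h := pvCM_getD_self (pvCountsD catDict g).items Prod.fst
      (pvExtItemB number duplicates catDict g) g.1 d
      (c.1, ((PySem.Set.inter c.2 (pvGset g)).length : Int)) hmem
      (pvCnt_items_nodup catDict g)
    rw [pvStepExtB, h]
    have hitem : pvExtItemB number duplicates catDict g
        (c.1, ((PySem.Set.inter c.2 (pvGset g)).length : Int))
        = pvTExtB number duplicates c g := by
      rw [pvExtItemB, pvTExtB, pvSizes_getD catDict c hc]
    rw [hitem]
  · have h := pvCM_getD_ne (pvCountsD catDict g).items Prod.fst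
      (pvExtItemB number duplicates catDict g) g.1 d c.1
      (pvCnt_not_mem_items catDict g c.1 hcont)
    rw [pvStepExtB, h]
    have hzero : (PySem.Set.inter c.2 (pvGset g)).length = 0 := by
      by_contra hne
      exact hcont ((pvCnt_contains catDict c hc g).mpr (Nat.pos_of_ne_zero hne))
    have hfalse : pvTExtB number duplicates c g = false := by
      have hnot : ¬ (number < (c.2.length : Int) ∧
          (c.2.length : Int) - ((PySem.Set.inter c.2 (pvGset g)).length : Int) ≤ number) := by
        rw [hzero]
        omega
      rw [pvTExtB, decide_eq_false hnot, Bool.and_false]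
    rw [hfalse]
    simp

lemma pvStepAllB_getD (catDict : List (String × List String))
    (c : String × List String) (hc : c ∈ pvItems catDict) (g : String × List String)
    (d : PySem.Dict String (List String)) :
    (pvStepAllB catDict g d).getD c.1 []
      = if pvTAllB c g then PySem.Set.add (d.getD c.1 []) g.1 else d.getD c.1 [] := by
  by_cases hcont : (pvCountsD catDict g).contains c.1 = true
  · have hmem := pvCnt_mem_items catDict c hc g hcont
    have h := pvM_getD_self (pvCountsD catDict g).items g.1 d
      (c.1, ((PySem.Set.inter c.2 (pvGset g)).length : Int)) hmem
      (pvCnt_items_nodup catDict g)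
    rw [pvStepAllB, h, if_pos]
    rw [pvTAllB]
    simpa using (pvCnt_contains catDict c hc g).mp hcont
  · have h := pvM_getD_ne (pvCountsD catDict g).items g.1 d c.1
      (pvCnt_not_mem_items catDict g c.1 hcont)
    rw [pvStepAllB, h, if_neg]
    rw [pvTAllB]
    intro hpos
    exact hcont ((pvCnt_contains catDict c hc g).mpr (by simpa using hpos))

lemma pvStepCore_keys (number : Int) (duplicates : Bool)
    (cs : List (String × List String)) (g : String × List String)
    (d : PySem.Dict String (List String)) (hd : d.keys = cs.map Prod.fst) :
    (pvStepCore number duplicates cs g d).keys = cs.map Prod.fst := by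
  rw [pvStepCore, pvCM_keys cs Prod.fst (fun c' => pvTCoreB number duplicates c' g) g.1 d ?_, hd]
  intro c' hc'
  rw [PySem.Dict.contains_iff_mem_keys, hd]
  exact List.mem_map_of_mem hc'

lemma pvStepAll_keys (cs : List (String × List String)) (g : String × List String)
    (d : PySem.Dict String (List String)) (hd : d.keys = cs.map Prod.fst) :
    (pvStepAll cs g d).keys = cs.map Prod.fst := by
  rw [pvStepAll, pvCM_keys cs Prod.fst (fun c' => pvTAllB c' g) g.1 d ?_, hd]
  intro c' hc'
  rw [PySem.Dict.contains_iff_mem_keys, hd]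
  exact List.mem_map_of_mem hc'

lemma pvStepAllB_keys (catDict : List (String × List String)) (g : String × List String)
    (d : PySem.Dict String (List String))
    (hd : d.keys = (pvItems catDict).map Prod.fst) :
    (pvStepAllB catDict g d).keys = (pvItems catDict).map Prod.fst := by
  rw [pvStepAllB, pvM_keys (pvCountsD catDict g).items g.1 d ?_, hd]
  intro p hp
  rw [PySem.Dict.contains_iff_mem_keys, hd]
  exact pvCnt_keys_sub catDict g p.1 (PySem.Dict.mem_keys_of_mem_items _ hp)

-- ---- items of an accumulated dict ----

lemma pvDict_items (cs : List (String × List String)) (hnd : (cs.map Prod.fst).Nodup)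
    (D : PySem.Dict String (List String)) (hkeys : D.keys = cs.map Prod.fst)
    (v : (String × List String) → List String)
    (hval : ∀ c ∈ cs, D.getD c.1 [] = v c) :
    D.items = cs.map (fun c => (c.1, v c)) := by
  rw [PySem.Dict.items_eq_map_keys D (by rw [hkeys]; exact hnd) [], hkeys, List.map_map]
  refine List.map_congr_left ?_
  intro c hc
  simp [Function.comp, hval c hc]

lemma pvInit_getD (cs : List (String × List String)) (hnd : (cs.map Prod.fst).Nodup)
    (c : String × List String) (hc : c ∈ cs) :
    (pvInitSets cs).getD c.1 [] = [] :=
  pvIL_getD cs hnd (fun _ => PySem.Set.empty) c hc []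

lemma pvInit_keys (cs : List (String × List String)) (hnd : (cs.map Prod.fst).Nodup) :
    (pvInitSets cs).keys = cs.map Prod.fst :=
  pvIL_keys cs hnd (fun _ => PySem.Set.empty)

lemma pvFoldChar (cs : List (String × List String)) (hnd : (cs.map Prod.fst).Nodup)
    (gs : List (String × List String)) (hndg : (gs.map Prod.fst).Nodup)
    (S : (String × List String) → PySem.Dict String (List String) → PySem.Dict String (List String))
    (T : (String × List String) → (String × List String) → Bool)
    (hget : ∀ c ∈ cs, ∀ g d, (S g d).getD c.1 [] =
      if T c g then PySem.Set.add (d.getD c.1 []) g.1 else d.getD c.1 [])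
    (hkeys : ∀ g d, d.keys = cs.map Prod.fst → (S g d).keys = cs.map Prod.fst) :
    (pvFoldD S gs (pvInitSets cs)).items
      = cs.map (fun c => (c.1, (gs.filter (fun g => T c g)).map Prod.fst)) := by
  refine pvDict_items cs hnd _ ?_ _ ?_
  · exact pvGF_keys (cs.map Prod.fst) S hkeys gs _ (pvInit_keys cs hnd)
  · intro c hc
    have h := pvGF_getD c.1 S (fun g => T c g) (fun g d => hget c hc g d) gs hndg
      (pvInitSets cs) (by intro g _; rw [pvInit_getD cs hnd c hc]; exact List.not_mem_nil)
    rw [h, pvInit_getD cs hnd c hc, List.nil_append]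

-- ---- the two ports in canonical form ----

lemma pvABody1 (number : Int) (duplicates : Bool) (g c : String × List String)
    (d : PySem.Dict String (List String)) :
    (if ((PySem.Set.diff c.2 (PySem.Set.ofList (List.map pvGenomeOf g.2))).length : Int) ≤ number then
       if duplicates = true then d.modify c.1 [] (fun s => PySem.Set.add s g.1)
       else if (List.map pvGenomeOf g.2).length = (PySem.Set.ofList (List.map pvGenomeOf g.2)).length then
         d.modify c.1 [] (fun s => PySem.Set.add s g.1)
       else d
     else d)
    = if pvTCoreB number duplicates c g then d.modify c.1 [] (fun s => PySem.Set.add s g.1)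
      else d := by
  simp only [pvTCoreB, pvOkB, pvGset, Bool.and_eq_true, Bool.or_eq_true, decide_eq_true_eq,
    beq_iff_eq]
  by_cases h1 : ((PySem.Set.diff c.2 (PySem.Set.ofList (List.map pvGenomeOf g.2))).length : Int) ≤ number
  · by_cases h2 : duplicates = true
    · simp [h1, h2]
    · by_cases h3 : (List.map pvGenomeOf g.2).length = (PySem.Set.ofList (List.map pvGenomeOf g.2)).length
      · rw [List.length_map] at h3
        simp [h1, h2, h3]
      · rw [List.length_map] at h3
        simp [h1, h2, h3]
  · simp [h1]

lemma pvABody2 (g c : String × List String) (d : PySem.Dict String (List String)) :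
    (if 0 < (PySem.Set.inter c.2 (PySem.Set.ofList (List.map pvGenomeOf g.2))).length then
       d.modify c.1 [] (fun s => PySem.Set.add s g.1)
     else d)
    = if pvTAllB c g then d.modify c.1 [] (fun s => PySem.Set.add s g.1) else d := by
  by_cases h : 0 < (PySem.Set.inter c.2 (PySem.Set.ofList (List.map pvGenomeOf g.2))).length <;>
    simp [pvTAllB, pvGset, h]

lemma pvBBodyE (number : Int) (duplicates : Bool) (catDict : List (String × List String))
    (g : String × List String) (p : String × Int) (d : PySem.Dict String (List String)) :
    (if pvOkB duplicates g = true ∧ number < (pvSizesD catDict).getD p.1 0 ∧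
        (pvSizesD catDict).getD p.1 0 - p.2 ≤ number then
       d.modify p.1 [] (fun s => PySem.Set.add s g.1)
     else d)
    = if pvExtItemB number duplicates catDict g p then
        d.modify p.1 [] (fun s => PySem.Set.add s g.1)
      else d := by
  simp only [pvExtItemB, Bool.and_eq_true, decide_eq_true_eq]

lemma pvASplit (groupsDict catDict : List (String × List String)) (number : Int)
    (duplicates : Bool) :
    (pvItems groupsDict).foldl
      (fun st g => (pvItems catDict).foldl
        (fun st c =>
          ((if ((PySem.Set.diff c.2 (PySem.Set.ofList (List.map pvGenomeOf g.2))).length : Int) ≤ number then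
              if duplicates = true then st.1.modify c.1 [] (fun s => PySem.Set.add s g.1)
              else if (List.map pvGenomeOf g.2).length = (PySem.Set.ofList (List.map pvGenomeOf g.2)).length then
                st.1.modify c.1 [] (fun s => PySem.Set.add s g.1)
              else st.1
            else st.1),
           (if 0 < (PySem.Set.inter c.2 (PySem.Set.ofList (List.map pvGenomeOf g.2))).length then
              st.2.modify c.1 [] (fun s => PySem.Set.add s g.1)
            else st.2))) st)
      (pvInitSets (pvItems catDict), pvInitSets (pvItems catDict))
    = (pvFoldD (pvStepCore number duplicates (pvItems catDict)) (pvItems groupsDict)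
        (pvInitSets (pvItems catDict)),
       pvFoldD (pvStepAll (pvItems catDict)) (pvItems groupsDict)
        (pvInitSets (pvItems catDict))) := by
  rw [pvFoldD, pvFoldD,
    ← PySem.List.foldl_prod_mk
      (f := fun d g => pvStepCore number duplicates (pvItems catDict) g d)
      (g := fun d g => pvStepAll (pvItems catDict) g d)]
  apply PySem.List.foldl_congr_mem'
  intro g _ st
  dsimp only
  have hsplit := PySem.List.foldl_prod_mk
    (f := fun s c => if ((PySem.Set.diff c.2 (PySem.Set.ofList (List.map pvGenomeOf g.2))).length : Int) ≤ number then
        if duplicates = true then s.modify c.1 [] (fun s => PySem.Set.add s g.1)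
        else if (List.map pvGenomeOf g.2).length = (PySem.Set.ofList (List.map pvGenomeOf g.2)).length then
          s.modify c.1 [] (fun s => PySem.Set.add s g.1)
        else s
      else s)
    (g := fun s c => if 0 < (PySem.Set.inter c.2 (PySem.Set.ofList (List.map pvGenomeOf g.2))).length then
        s.modify c.1 [] (fun s => PySem.Set.add s g.1)
      else s)
    (pvItems catDict) st.1 st.2
  refine Eq.trans (Eq.trans ?_ hsplit) ?_
  · rfl
  · refine Prod.ext ?_ ?_
    · dsimp only
      rw [pvStepCore]
      apply PySem.List.foldl_congr_mem'
      intro c _ d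
      exact pvABody1 number duplicates g c d
    · dsimp only
      rw [pvStepAll]
      apply PySem.List.foldl_congr_mem'
      intro c _ d
      exact pvABody2 g c d

lemma pvA_eq (groupsDict catDict : List (String × List String)) (number : Int)
    (duplicates : Bool) :
    get_core_genomes groupsDict catDict number duplicates
      = ((pvFoldD (pvStepCore number duplicates (pvItems catDict)) (pvItems groupsDict)
            (pvInitSets (pvItems catDict))).items,
         (pvFoldD (pvStepAll (pvItems catDict)) (pvItems groupsDict)
            (pvInitSets (pvItems catDict))).items) := by
  unfold get_core_genomes pvFinish
  dsimp only
  rw [pvASplit groupsDict catDict number duplicates]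

lemma pvBSplit (groupsDict catDict : List (String × List String)) (number : Int)
    (duplicates : Bool) :
    (pvItems groupsDict).foldl
      (fun (st : List String × PySem.Dict String (List String) × PySem.Dict String (List String)) g =>
        ((if pvOkB duplicates g = true then st.1 ++ [g.1] else st.1),
         ((pvCountsD catDict g).items.foldl
            (fun st2 p =>
              ((if pvOkB duplicates g = true ∧ number < (pvSizesD catDict).getD p.1 0 ∧
                    (pvSizesD catDict).getD p.1 0 - p.2 ≤ number then
                  st2.1.modify p.1 [] (fun s => PySem.Set.add s g.1)
                else st2.1),
               st2.2.modify p.1 [] (fun s => PySem.Set.add s g.1)))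
            (st.2.1, st.2.2)).1,
         ((pvCountsD catDict g).items.foldl
            (fun st2 p =>
              ((if pvOkB duplicates g = true ∧ number < (pvSizesD catDict).getD p.1 0 ∧
                    (pvSizesD catDict).getD p.1 0 - p.2 ≤ number then
                  st2.1.modify p.1 [] (fun s => PySem.Set.add s g.1)
                else st2.1),
               st2.2.modify p.1 [] (fun s => PySem.Set.add s g.1)))
            (st.2.1, st.2.2)).2))
      ([], pvInitSets (pvItems catDict), pvInitSets (pvItems catDict))
    = ((pvItems groupsDict).foldl
        (fun l g => if pvOkB duplicates g = true then l ++ [g.1] else l) [],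
       pvFoldD (pvStepExtB number duplicates catDict) (pvItems groupsDict)
        (pvInitSets (pvItems catDict)),
       pvFoldD (pvStepAllB catDict) (pvItems groupsDict)
        (pvInitSets (pvItems catDict))) := by
  rw [pvFoldD, pvFoldD,
    ← PySem.List.foldl_prod_mk
      (f := fun d g => pvStepExtB number duplicates catDict g d)
      (g := fun d g => pvStepAllB catDict g d),
    ← PySem.List.foldl_prod_mk
      (f := fun l g => if pvOkB duplicates g = true then l ++ [g.1] else l)
      (g := fun s2 g => (pvStepExtB number duplicates catDict g s2.1,
        pvStepAllB catDict g s2.2))]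
  apply PySem.List.foldl_congr_mem'
  intro g _ st
  dsimp only
  have hsplit := PySem.List.foldl_prod_mk
    (f := fun s p => if pvOkB duplicates g = true ∧ number < (pvSizesD catDict).getD p.1 0 ∧
          (pvSizesD catDict).getD p.1 0 - p.2 ≤ number then
        s.modify p.1 [] (fun s => PySem.Set.add s g.1)
      else s)
    (g := fun s p => s.modify p.1 [] (fun s => PySem.Set.add s g.1))
    (pvCountsD catDict g).items st.2.1 st.2.2
  rw [hsplit]
  dsimp only
  refine Prod.ext rfl (Prod.ext ?_ rfl)
  dsimp only
  rw [pvStepExtB]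
  apply PySem.List.foldl_congr_mem'
  intro p _ d
  exact pvBBodyE number duplicates catDict g p d

lemma pvB_eq (groupsDict catDict : List (String × List String)) (number : Int)
    (duplicates : Bool) :
    get_core_genomes_alt groupsDict catDict number duplicates
      = (((pvItems catDict).foldl
            (fun d c => d.insert c.1
              (if (pvSizesD catDict).getD c.1 0 ≤ number then
                PySem.Set.ofList ((pvItems groupsDict).foldl
                  (fun l g => if pvOkB duplicates g = true then l ++ [g.1] else l) [])
              else (pvFoldD (pvStepExtB number duplicates catDict) (pvItems groupsDict)
                (pvInitSets (pvItems catDict))).getD c.1 []))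
            PySem.Dict.empty).items,
         (pvFoldD (pvStepAllB catDict) (pvItems groupsDict)
            (pvInitSets (pvItems catDict))).items) := by
  show (((pvItems catDict).foldl
          (fun d c => d.insert c.1
            (if (pvSizesD catDict).getD c.1 0 ≤ number then
              PySem.Set.ofList ((pvItems groupsDict).foldl
                (fun (st : List String × PySem.Dict String (List String) × PySem.Dict String (List String)) g =>
                  ((if pvOkB duplicates g = true then st.1 ++ [g.1] else st.1),
                   ((pvCountsD catDict g).items.foldl
                      (fun st2 p =>
                        ((if pvOkB duplicates g = true ∧ number < (pvSizesD catDict).getD p.1 0 ∧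
                              (pvSizesD catDict).getD p.1 0 - p.2 ≤ number then
                            st2.1.modify p.1 [] (fun s => PySem.Set.add s g.1)
                          else st2.1),
                         st2.2.modify p.1 [] (fun s => PySem.Set.add s g.1)))
                      (st.2.1, st.2.2)).1,
                   ((pvCountsD catDict g).items.foldl
                      (fun st2 p =>
                        ((if pvOkB duplicates g = true ∧ number < (pvSizesD catDict).getD p.1 0 ∧
                              (pvSizesD catDict).getD p.1 0 - p.2 ≤ number then
                            st2.1.modify p.1 [] (fun s => PySem.Set.add s g.1)
                          else st2.1),
                         st2.2.modify p.1 [] (fun s => PySem.Set.add s g.1)))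
                      (st.2.1, st.2.2)).2))
                ([], pvInitSets (pvItems catDict), pvInitSets (pvItems catDict))).1
            else ((pvItems groupsDict).foldl
                (fun (st : List String × PySem.Dict String (List String) × PySem.Dict String (List String)) g =>
                  ((if pvOkB duplicates g = true then st.1 ++ [g.1] else st.1),
                   ((pvCountsD catDict g).items.foldl
                      (fun st2 p =>
                        ((if pvOkB duplicates g = true ∧ number < (pvSizesD catDict).getD p.1 0 ∧
                              (pvSizesD catDict).getD p.1 0 - p.2 ≤ number then
                            st2.1.modify p.1 [] (fun s => PySem.Set.add s g.1)
                          else st2.1),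
                         st2.2.modify p.1 [] (fun s => PySem.Set.add s g.1)))
                      (st.2.1, st.2.2)).1,
                   ((pvCountsD catDict g).items.foldl
                      (fun st2 p =>
                        ((if pvOkB duplicates g = true ∧ number < (pvSizesD catDict).getD p.1 0 ∧
                              (pvSizesD catDict).getD p.1 0 - p.2 ≤ number then
                            st2.1.modify p.1 [] (fun s => PySem.Set.add s g.1)
                          else st2.1),
                         st2.2.modify p.1 [] (fun s => PySem.Set.add s g.1)))
                      (st.2.1, st.2.2)).2))
                ([], pvInitSets (pvItems catDict), pvInitSets (pvItems catDict))).2.1.getD c.1 []))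
          PySem.Dict.empty).items,
        ((pvItems groupsDict).foldl
          (fun (st : List String × PySem.Dict String (List String) × PySem.Dict String (List String)) g =>
            ((if pvOkB duplicates g = true then st.1 ++ [g.1] else st.1),
             ((pvCountsD catDict g).items.foldl
                (fun st2 p =>
                  ((if pvOkB duplicates g = true ∧ number < (pvSizesD catDict).getD p.1 0 ∧
                        (pvSizesD catDict).getD p.1 0 - p.2 ≤ number then
                      st2.1.modify p.1 [] (fun s => PySem.Set.add s g.1)
                    else st2.1),
                   st2.2.modify p.1 [] (fun s => PySem.Set.add s g.1)))
                (st.2.1, st.2.2)).1,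
             ((pvCountsD catDict g).items.foldl
                (fun st2 p =>
                  ((if pvOkB duplicates g = true ∧ number < (pvSizesD catDict).getD p.1 0 ∧
                        (pvSizesD catDict).getD p.1 0 - p.2 ≤ number then
                      st2.1.modify p.1 [] (fun s => PySem.Set.add s g.1)
                    else st2.1),
                   st2.2.modify p.1 [] (fun s => PySem.Set.add s g.1)))
                (st.2.1, st.2.2)).2))
          ([], pvInitSets (pvItems catDict), pvInitSets (pvItems catDict))).2.2.items)
      = _
  rw [pvBSplit groupsDict catDict number duplicates]

theorem get_core_genomes_eq (groupsDict catDict : List (String × List String))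
    (number : Int) (duplicates : Bool) :
    get_core_genomes groupsDict catDict number duplicates
      = get_core_genomes_alt groupsDict catDict number duplicates := by
  rw [pvA_eq, pvB_eq]
  have hndc := pvItems_keys_nodup catDict
  have hndg := pvItems_keys_nodup groupsDict
  rw [Prod.mk.injEq]
  refine ⟨?_, ?_⟩
  · rw [pvFoldChar (pvItems catDict) hndc (pvItems groupsDict) hndg _
        (fun c g => pvTCoreB number duplicates c g)
        (fun c hc g d => pvStepCore_getD number duplicates _ hndc c hc g d)
        (fun g d hd => pvStepCore_keys number duplicates _ g d hd),
      pvIL_items (pvItems catDict) hndc _]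
    refine List.map_congr_left ?_
    intro c hc
    refine Prod.ext rfl ?_
    dsimp only
    rw [pvSizes_getD catDict c hc,
      PySem.List.foldl_append_if (p := fun g => pvOkB duplicates g) (f := Prod.fst),
      List.nil_append]
    have hnodup : (((pvItems groupsDict).filter (fun g => pvOkB duplicates g)).map Prod.fst).Nodup := by
      have hsub : List.Sublist
          (((pvItems groupsDict).filter (fun g => pvOkB duplicates g)).map Prod.fst)
          ((pvItems groupsDict).map Prod.fst) := List.Sublist.map Prod.fst List.filter_sublist
      exact hndg.sublist hsub
    rw [PySem.Set.ofList_eq_self_of_nodup _ hnodup,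
      pvGF_getD c.1 _ (fun g => pvTExtB number duplicates c g)
        (fun g d => pvStepExtB_getD number duplicates catDict c hc g d)
        (pvItems groupsDict) hndg _
        (by intro g _
            rw [pvInit_getD _ hndc c hc]
            exact List.not_mem_nil),
      pvInit_getD _ hndc c hc, List.nil_append]
    by_cases hsmall : (c.2.length : Int) ≤ number
    · rw [if_pos hsmall]
      refine congrArg (List.map Prod.fst) (List.filter_congr ?_)
      intro g _
      have hle : ((PySem.Set.diff c.2 (pvGset g)).length : Int) ≤ number := by
        have h1 : (PySem.Set.diff c.2 (pvGset g)).length ≤ c.2.length := by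
          rw [PySem.Set.diff]
          exact List.length_filter_le _ _
        omega
      rw [pvTCoreB, decide_eq_true hle, Bool.and_true]
    · rw [if_neg hsmall]
      refine congrArg (List.map Prod.fst) (List.filter_congr ?_)
      intro g _
      have hiff : (((PySem.Set.diff c.2 (pvGset g)).length : Int) ≤ number)
          ↔ (number < (c.2.length : Int) ∧
            (c.2.length : Int) - ((PySem.Set.inter c.2 (pvGset g)).length : Int) ≤ number) := by
        have := pvDiffInter c.2 (pvGset g)
        omega
      rw [pvTCoreB, pvTExtB, decide_eq_decide.mpr hiff]
  · rw [pvFoldChar (pvItems catDict) hndc (pvItems groupsDict) hndg _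
        (fun c g => pvTAllB c g)
        (fun c hc g d => pvStepAll_getD _ hndc c hc g d)
        (fun g d hd => pvStepAll_keys _ g d hd),
      pvFoldChar (pvItems catDict) hndc (pvItems groupsDict) hndg _
        (fun c g => pvTAllB c g)
        (fun c hc g d => pvStepAllB_getD catDict c hc g d)
        (fun g d hd => pvStepAllB_keys catDict g d hd)]

-- ===== VERDICT (by name: the statement is the Claim_ definition above) =====
theorem get_core_genomes_spec : Claim_equal_get_core_genomes := by
  intro groupsDict catDict number duplicates _
  unfold Spec_get_core_genomes
  exact get_core_genomes_eq groupsDict catDict number duplicates
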